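-- pv_equiv track=rewrite | github.com/xonsh/xonsh | xonsh/tools.py | argvquote
-- ===== SOURCE A (Python) =====
-- def argvquote(arg, force=False):
--     """Returns an argument quoted in such a way that that CommandLineToArgvW
--     on Windows will return the argument string unchanged.
--     This is the same thing Popen does when supplied with an list of arguments.
--     Arguments in a command line should be separated by spaces; this
--     function does not add these spaces. This implementation follows the
--     suggestions outlined here:
--     https://blogs.msdn.microsoft.com/twistylittlepassagesallalike/2011/04/23/everyone-quotes-command-line-arguments-the-wrong-way/
--     """
--     if not force and len(arg) != 0 and not any([c in arg for c in ' \t\n\v"']):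
--         return arg
--     else:
--         n_backslashes = 0
--         cmdline = '"'
--         for c in arg:
--             if c == "\\":
--                 # first count the number of current backslashes
--                 n_backslashes += 1
--                 continue
--             if c == '"':
--                 # Escape all backslashes and the following double quotation mark
--                 cmdline += (n_backslashes * 2 + 1) * "\\"
--             else:
--                 # backslashes are not special here
--                 cmdline += n_backslashes * "\\"
--             n_backslashes = 0
--             cmdline += c
--         # Escape all backslashes, but let the terminating
--         # double quotation mark we add below be interpreted
--         # as a metacharacter
--         cmdline += +n_backslashes * 2 * "\\" + '"'
--         return cmdline
-- ===== SOURCE B (Python) =====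
-- def argvquote(arg, force=False):
--     """Quote an argument for Windows CommandLineToArgvW.
--
--     Same fast path as the original; otherwise work by quote-delimited
--     segments instead of a per-character loop: split on '"', double each
--     segment's trailing backslash run, and rejoin with '\\"' (escaped
--     quote), wrapping the whole thing in quotes.
--     """
--     if not force and len(arg) != 0 and not any([c in arg for c in ' \t\n\v"']):
--         return arg
--     else:
--         parts = arg.split('"')
--         doubled = [p + (len(p) - len(p.rstrip("\\"))) * "\\" for p in parts]
--         return '"' + '\\"'.join(doubled) + '"'
-- ===== Notes on version B (the rewrite author's own statement) =====
-- stated objective: idiomatic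
-- what changed: Replaces the per-character loop with pending-backslash state by a split-on-quote pipeline: split the argument on '"', double each segment's trailing backslash run, and rejoin the segments with an escaped quote.
import Mathlib
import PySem

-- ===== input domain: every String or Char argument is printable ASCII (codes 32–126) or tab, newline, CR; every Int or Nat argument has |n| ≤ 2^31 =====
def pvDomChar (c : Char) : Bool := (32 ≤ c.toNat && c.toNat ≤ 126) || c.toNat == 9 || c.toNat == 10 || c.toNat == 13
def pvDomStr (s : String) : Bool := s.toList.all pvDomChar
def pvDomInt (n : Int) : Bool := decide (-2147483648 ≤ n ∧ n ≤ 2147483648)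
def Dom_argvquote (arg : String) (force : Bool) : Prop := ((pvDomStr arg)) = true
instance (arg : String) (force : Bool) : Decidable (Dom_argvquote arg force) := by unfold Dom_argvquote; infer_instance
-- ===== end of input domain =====

-- B replaces A's per-character loop by a split-on-quote pipeline (split, double trailing backslashes, rejoin); same cost, more idiomatic.

-- ===== PORT A =====
-- the for-loop over arg: state = (n_backslashes, cmdline as List Char)
def argvquoteLoop : List Char → Nat → List Char → Nat × List Char
  | [], n, acc => (n, acc)
  | c :: cs, n, acc =>
    if c = '\\' then argvquoteLoop cs (n + 1) acc
    else if c = '"' then argvquoteLoop cs 0 ((acc ++ List.replicate (n * 2 + 1) '\\') ++ [c])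
    else argvquoteLoop cs 0 ((acc ++ List.replicate n '\\') ++ [c])

def argvquote (arg : String) (force : Bool) : String :=
  let s := arg.toList
  -- not force and len(arg) != 0 and not any([c in arg for c in ' \t\n\v"'])
  if !force && s.length ≠ 0 && !(([' ', '\t', '\n', Char.ofNat 11, '"'].map (fun c => s.contains c)).any id) then
    arg
  else
    let r := argvquoteLoop s 0 ['"']
    String.mk ((r.2 ++ List.replicate (r.1 * 2) '\\') ++ ['"'])

-- ===== PORT B =====
-- hand port of arg.split('"') (single-character separator; exact: keeps empty pieces, '' ↦ [''])
def splitQ : List Char → List (List Char)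
  | [] => [[]]
  | c :: cs =>
    if c = '"' then [] :: splitQ cs
    else
      match splitQ cs with
      | [] => [[c]]  -- unreachable: splitQ never returns []
      | p :: ps => (c :: p) :: ps

-- hand port of p.rstrip("\\") (exact: drop trailing backslashes)
def rstripBS (p : List Char) : List Char := (p.reverse.dropWhile (· = '\\')).reverse

def dblTrail (p : List Char) : List Char :=
  p ++ List.replicate (p.length - (rstripBS p).length) '\\'

def argvquote_alt (arg : String) (force : Bool) : String :=
  let s := arg.toList
  if !force && s.length ≠ 0 && !(([' ', '\t', '\n', Char.ofNat 11, '"'].map (fun c => s.contains c)).any id) then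
    arg
  else
    let doubled := (splitQ s).map dblTrail
    String.mk (('"' :: List.intercalate ['\\', '"'] doubled) ++ ['"'])

-- ===== PRECONDITION & SPEC =====
def Spec_argvquote (arg : String) (force : Bool) (out : String) : Prop := out = argvquote_alt arg force
instance (arg : String) (force : Bool) (out : String) : Decidable (Spec_argvquote arg force out) := by unfold Spec_argvquote; infer_instance

-- ===== CLAIM (what is proved, stated in full; the proofs are below) =====
def Claim_equal_argvquote : Prop := ∀ (arg : String) (force : Bool), Dom_argvquote arg force → Spec_argvquote arg force (argvquote arg force)

-- ===== LEMMAS AND PROOFS =====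

-- common recursive characterisation of the quoted body (after the opening '"')
def spec : List Char → Nat → List Char
  | [], n => List.replicate (2 * n) '\\' ++ ['"']
  | c :: cs, n =>
    if c = '\\' then spec cs (n + 1)
    else if c = '"' then List.replicate (2 * n + 1) '\\' ++ c :: spec cs 0
    else List.replicate n '\\' ++ c :: spec cs 0

theorem loop_spec (s : List Char) : ∀ (n : Nat) (acc : List Char),
    (argvquoteLoop s n acc).2 ++ List.replicate ((argvquoteLoop s n acc).1 * 2) '\\' ++ ['"']
      = acc ++ spec s n := by
  induction s with
  | nil => intro n acc; simp [argvquoteLoop, spec, Nat.mul_comm]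
  | cons c cs ih =>
    intro n acc
    simp only [argvquoteLoop, spec]
    split_ifs with h1 h2
    · exact ih (n + 1) acc
    · rw [ih]; simp [Nat.mul_comm]
    · rw [ih]; simp

theorem splitQ_ne_nil (s : List Char) : splitQ s ≠ [] := by
  cases s with
  | nil => simp [splitQ]
  | cons c cs =>
    simp only [splitQ]
    split_ifs with h
    · simp
    · cases splitQ cs <;> simp

theorem splitQ_bs (n : Nat) (t : List Char) :
    splitQ (List.replicate n '\\' ++ t)
      = (List.replicate n '\\' ++ (splitQ t).headI) :: (splitQ t).tail := by
  induction n with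
  | zero =>
    obtain ⟨p, ps, hps⟩ := List.exists_cons_of_ne_nil (splitQ_ne_nil t)
    simp [hps]
  | succ m ih =>
    simp only [List.replicate_succ, List.cons_append, splitQ]
    rw [if_neg (by decide), ih]

theorem trail_replicate (n : Nat) :
    (List.replicate n '\\').length - (rstripBS (List.replicate n '\\')).length = n := by
  simp [rstripBS]

theorem dbl_replicate (n : Nat) :
    dblTrail (List.replicate n '\\') = List.replicate (2 * n) '\\' := by
  unfold dblTrail
  rw [trail_replicate, ← List.replicate_add]
  congr 1
  omega

-- trailing-backslash count ignores everything before a non-backslash char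
theorem trail_append (l p : List Char) (c : Char) (hc : c ≠ '\\') :
    (l ++ c :: p).length - (rstripBS (l ++ c :: p)).length
      = p.length - (rstripBS p).length := by
  have hc1 : List.dropWhile (fun x => decide (x = '\\')) [c] = [c] := by
    simp [List.dropWhile, hc]
  simp only [rstripBS, List.reverse_append, List.reverse_cons, List.length_reverse]
  rw [List.dropWhile_append, List.dropWhile_append]
  have hlp := List.length_dropWhile_le (fun x => decide (x = '\\')) p.reverse
  by_cases hp : (List.dropWhile (fun x => decide (x = '\\')) p.reverse).isEmpty
  · have hp2 : List.dropWhile (fun x => decide (x = '\\')) p.reverse = [] := by simpa using hp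
    simp [hp2, hc1]
    omega
  · have hp' : (List.dropWhile (fun x => decide (x = '\\')) p.reverse).isEmpty = false := by
      simpa using hp
    simp only [hp', Bool.false_eq_true, if_false, hc1]
    rw [if_neg (by simp)]
    simp only [List.length_append, List.length_cons, List.length_nil, List.length_reverse] at *
    omega

theorem dbl_bs_append (n : Nat) (p : List Char) (c : Char) (hc : c ≠ '\\') :
    dblTrail (List.replicate n '\\' ++ c :: p)
      = List.replicate n '\\' ++ c :: dblTrail p := by
  unfold dblTrail
  rw [trail_append (List.replicate n '\\') p c hc]
  simp

theorem intercalate_cons_of_ne_nil (sep x : List Char) (l : List (List Char)) (h : l ≠ []) :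
    List.intercalate sep (x :: l) = x ++ sep ++ List.intercalate sep l := by
  obtain ⟨y, ys, rfl⟩ := List.exists_cons_of_ne_nil h
  simp [List.intercalate, List.append_assoc]

theorem intercalate_cons_append (sep x y : List Char) (l : List (List Char)) :
    List.intercalate sep ((x ++ y) :: l) = x ++ List.intercalate sep (y :: l) := by
  cases l with
  | nil => simp [List.intercalate]
  | cons z zs => simp [List.intercalate, List.append_assoc]

theorem bside_spec (s : List Char) : ∀ n : Nat,
    List.intercalate ['\\', '"'] ((splitQ (List.replicate n '\\' ++ s)).map dblTrail) ++ ['"']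
      = spec s n := by
  induction s with
  | nil =>
    intro n
    have hs : splitQ (List.replicate n '\\' ++ ([] : List Char)) = [List.replicate n '\\'] := by
      rw [splitQ_bs]; simp [splitQ]
    rw [hs]
    simp [spec, List.intercalate, dbl_replicate]
  | cons c cs ih =>
    intro n
    by_cases h1 : c = '\\'
    · subst h1
      rw [show List.replicate n '\\' ++ '\\' :: cs = List.replicate (n + 1) '\\' ++ cs by
        simp [List.replicate_succ']]
      rw [ih (n + 1)]
      simp [spec]
    · by_cases h2 : c = '"'
      · subst h2
        have hs : splitQ (List.replicate n '\\' ++ '"' :: cs)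
            = List.replicate n '\\' :: splitQ cs := by
          rw [splitQ_bs]; simp [splitQ]
        rw [hs, List.map_cons,
          intercalate_cons_of_ne_nil _ _ _ (by simp [splitQ_ne_nil cs]),
          dbl_replicate]
        have hb := ih 0
        simp only [List.replicate, List.nil_append] at hb
        simp only [spec, if_neg (by decide : ¬('"' : Char) = '\\'), if_pos rfl]
        rw [← hb]
        simp [List.replicate_succ', List.append_assoc]
      · have hs : splitQ (List.replicate n '\\' ++ c :: cs)
            = (List.replicate n '\\' ++ (splitQ (c :: cs)).headI) :: (splitQ (c :: cs)).tail :=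
          splitQ_bs n (c :: cs)
        obtain ⟨p, ps, hps⟩ := List.exists_cons_of_ne_nil (splitQ_ne_nil cs)
        have hccs : splitQ (c :: cs) = (c :: p) :: ps := by
          simp only [splitQ, if_neg h2, hps]
        rw [hccs] at hs
        simp only [List.headI, List.tail] at hs
        rw [hs, List.map_cons, dbl_bs_append n p c h1,
          show List.replicate n '\\' ++ c :: dblTrail p
              = (List.replicate n '\\' ++ [c]) ++ dblTrail p by simp,
          intercalate_cons_append]
        have hb := ih 0
        simp only [List.replicate, List.nil_append, hps, List.map_cons] at hb
        simp only [spec, if_neg h1, if_neg h2]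
        rw [← hb]
        simp [List.append_assoc]

-- ===== VERDICT (by name: the statement is the Claim_ definition above) =====
theorem argvquote_spec : Claim_equal_argvquote := by
  intro arg force _
  unfold Spec_argvquote argvquote argvquote_alt
  dsimp only
  split_ifs with h
  · rfl
  · have hA := loop_spec arg.toList 0 ['"']
    have hB := bside_spec arg.toList 0
    simp only [List.replicate, List.nil_append] at hB
    congr 1
    rw [hA, ← hB]
    simp
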